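-- pv_equiv track=rewrite | github.com/llinjupt/mlhowto | footstone/bayes.py | vocab_freq_get
-- ===== SOURCE A (Python) =====
-- def vocab_freq_get(vocab_list, msg_array):
--     words_list = []
--     for i in msg_array:
--         words_list += i
--
--     freq_list = []
--     for i in vocab_list:
--         freq_list.append(words_list.count(i))
--
--     return freq_list
-- ===== SOURCE B (Python) =====
-- def vocab_freq_get(vocab_list, msg_array):
--     index = {}
--     for pos, w in enumerate(vocab_list):
--         index.setdefault(w, []).append(pos)
--     freq_list = [0] * len(vocab_list)
--     for msg in msg_array:
--         for w in msg:
--             for pos in index.get(w, ()):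
--                 freq_list[pos] += 1
--     return freq_list
-- ===== Notes on version B (the rewrite author's own statement) =====
-- stated objective: alternative
-- what changed: Inverts the traversal: instead of flattening all messages and scanning the whole word list once per vocab entry, B builds a word-to-positions index over vocab_list, starts from a zero vector, and scatters +1 increments into the output during one forward pass over the messages (duplicate vocab entries map to all their positions).
import Mathlib
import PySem

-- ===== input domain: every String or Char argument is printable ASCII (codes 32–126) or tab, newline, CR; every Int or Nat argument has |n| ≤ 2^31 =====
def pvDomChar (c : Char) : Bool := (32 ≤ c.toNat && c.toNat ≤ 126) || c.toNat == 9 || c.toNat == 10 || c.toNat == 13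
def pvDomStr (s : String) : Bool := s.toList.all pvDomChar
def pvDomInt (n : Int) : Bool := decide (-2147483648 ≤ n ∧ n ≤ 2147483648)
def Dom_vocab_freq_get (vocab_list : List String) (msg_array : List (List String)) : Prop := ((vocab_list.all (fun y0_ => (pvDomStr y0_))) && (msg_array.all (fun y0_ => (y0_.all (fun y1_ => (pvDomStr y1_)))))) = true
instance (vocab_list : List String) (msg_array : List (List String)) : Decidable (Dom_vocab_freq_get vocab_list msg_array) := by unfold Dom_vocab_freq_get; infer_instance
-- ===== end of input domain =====

-- B inverts A's traversal: a vocab-word → positions index plus a zero vector, filled by scattering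
-- increments during one forward pass over the messages, instead of counting the flattened word list
-- once per vocab entry (an alternative algorithm of comparable measured cost).

-- ===== PORT A =====
-- Port of A: flatten msg_array into words_list, then append words_list.count(i) for each vocab word.
def vocab_freq_get (vocab_list : List String) (msg_array : List (List String)) : List Int :=
  let words_list : List String := msg_array.foldl (fun acc i => acc ++ i) []
  let freq_list : List Int := vocab_list.foldl (fun acc i => acc ++ [(PySem.List.count words_list i : Int)]) []
  freq_list

-- ===== PORT B =====
-- Port of B: index maps each vocab word to all its positions ('enumerate' ported as List.zipIdx,
-- whose Nat indices are exactly Python's nonnegative positions; setdefault(w,[]).append(pos) as an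
-- insert of the appended list); freq_list starts as [0]*len(vocab_list) and 'freq_list[pos] += 1'
-- is List.set at pos (exact: every pos stored in the index is a valid index of freq_list).
def vocab_freq_get_alt (vocab_list : List String) (msg_array : List (List String)) : List Int :=
  let index : PySem.Dict String (List Nat) :=
    (vocab_list.zipIdx).foldl (fun d pw => d.insert pw.1 (d.getD pw.1 [] ++ [pw.2])) PySem.Dict.empty
  let freq0 : List Int := List.replicate vocab_list.length 0
  msg_array.foldl (fun freq msg =>
    msg.foldl (fun freq w =>
      (index.getD w []).foldl (fun freq pos => freq.set pos (freq.getD pos 0 + 1)) freq) freq) freq0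

-- ===== PRECONDITION & SPEC =====
def Spec_vocab_freq_get (vocab_list : List String) (msg_array : List (List String)) (out : List Int) : Prop := out = vocab_freq_get_alt vocab_list msg_array
instance (vocab_list : List String) (msg_array : List (List String)) (out : List Int) : Decidable (Spec_vocab_freq_get vocab_list msg_array out) := by unfold Spec_vocab_freq_get; infer_instance

-- ===== CLAIM (what is proved, stated in full; the proofs are below) =====
def Claim_equal_vocab_freq_get : Prop := ∀ (vocab_list : List String) (msg_array : List (List String)), Dom_vocab_freq_get vocab_list msg_array → Spec_vocab_freq_get vocab_list msg_array (vocab_freq_get vocab_list msg_array)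

-- ===== LEMMAS AND PROOFS =====

-- The word → positions index, as a standalone function (definitionally B's `index`).
def pvIdx (vocab_list : List String) : PySem.Dict String (List Nat) :=
  (vocab_list.zipIdx).foldl (fun d pw => d.insert pw.1 (d.getD pw.1 [] ++ [pw.2])) PySem.Dict.empty

-- getD of the index-building fold: appends the positions of w among ps to what d already holds.
lemma getD_idx_fold (ps : List (String × Nat)) (d : PySem.Dict String (List Nat)) (w : String) :
    (ps.foldl (fun d pw => d.insert pw.1 (d.getD pw.1 [] ++ [pw.2])) d).getD w []
      = d.getD w [] ++ (ps.filter (fun pw => pw.1 == w)).map (·.2) := by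
  induction ps generalizing d with
  | nil => simp
  | cons pw ps ih =>
    simp only [List.foldl_cons, ih, PySem.Dict.getD_insert, List.filter_cons]
    by_cases h : pw.1 = w
    · simp [h, List.append_assoc]
    · simp [h, Ne.symm h]

-- How many times position p occurs among the positions of w in vocab.zipIdx n: once iff
-- p names an occurrence of w, never otherwise.
lemma count_positions (vocab : List String) (n p : Nat) (w : String) :
    (((vocab.zipIdx n).filter (fun pw => pw.1 == w)).map (·.2)).count p
      = if n ≤ p ∧ vocab[p - n]? = some w then 1 else 0 := by
  induction vocab generalizing n with
  | nil => simp
  | cons v vs ih =>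
    simp only [List.zipIdx_cons, List.filter_cons]
    by_cases hv : v = w
    · simp only [hv, beq_self_eq_true, if_pos trivial, List.map_cons, List.count_cons, ih]
      rcases Nat.lt_trichotomy p n with hpn | hpn | hpn
      · have h1 : ¬ n ≤ p := by omega
        have h2 : ¬ n + 1 ≤ p := by omega
        simp [h1, h2, Ne.symm (by omega : p ≠ n)]
      · subst hpn
        have h2 : ¬ p + 1 ≤ p := by omega
        simp [h2]
      · have h2 : p - n = (p - (n + 1)) + 1 := by omega
        have h3 : n ≤ p := by omega
        have h4 : n + 1 ≤ p := by omega
        simp [h2, h3, h4, Ne.symm (by omega : p ≠ n)]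
    · rw [if_neg (by simp [hv]), ih]
      rcases Nat.lt_trichotomy p n with hpn | hpn | hpn
      · have h1 : ¬ n ≤ p := by omega
        have h2 : ¬ n + 1 ≤ p := by omega
        simp [h1, h2]
      · subst hpn
        have h2 : ¬ p + 1 ≤ p := by omega
        simp [h2, hv]
      · have h2 : p - n = (p - (n + 1)) + 1 := by omega
        have h3 : n ≤ p := by omega
        have h4 : n + 1 ≤ p := by omega
        simp [h2, h3, h4]

-- For a valid position p, the index's list for w contains p once iff vocab[p] = w.
lemma count_pvIdx (vocab : List String) (w : String) (p : Nat) (hp : p < vocab.length) :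
    ((pvIdx vocab).getD w []).count p = if vocab[p] = w then 1 else 0 := by
  unfold pvIdx
  rw [getD_idx_fold, PySem.Dict.getD_empty, List.nil_append, count_positions]
  simp [hp]

-- The scatter loop preserves the length of freq.
lemma length_inc_fold (L : List Nat) (freq : List Int) :
    (L.foldl (fun freq pos => freq.set pos (freq.getD pos 0 + 1)) freq).length = freq.length := by
  induction L generalizing freq with
  | nil => rfl
  | cons x xs ih => rw [List.foldl_cons, ih, List.length_set]

-- The scatter loop adds L.count p to entry p.
lemma getD_inc_fold (L : List Nat) (freq : List Int) (p : Nat) (hp : p < freq.length) :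
    (L.foldl (fun freq pos => freq.set pos (freq.getD pos 0 + 1)) freq).getD p 0
      = freq.getD p 0 + (L.count p : Int) := by
  induction L generalizing freq with
  | nil => simp
  | cons x xs ih =>
    simp only [List.foldl_cons, List.count_cons]
    rw [ih _ (by simpa using hp)]
    have hset : (freq.set x (freq.getD x 0 + 1)).getD p 0
        = freq.getD p 0 + if x = p then 1 else 0 := by
      simp only [List.getD_eq_getElem?_getD, List.getElem?_set]
      by_cases h : x = p
      · subst h; simp [hp]
      · simp [h]
    rw [hset]
    by_cases h : x = p
    · simp [h]; ring
    · simp [h]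

-- The word loop over a plain word list ws adds ws.count vocab[p] to entry p.
lemma getD_word_fold (vocab : List String) (ws : List String) (freq : List Int)
    (hlen : freq.length = vocab.length) (p : Nat) (hp : p < vocab.length) :
    (ws.foldl (fun freq w =>
        ((pvIdx vocab).getD w []).foldl (fun freq pos => freq.set pos (freq.getD pos 0 + 1)) freq)
      freq).getD p 0 = freq.getD p 0 + (ws.count vocab[p] : Int) := by
  induction ws generalizing freq with
  | nil => simp
  | cons w ws ih =>
    simp only [List.foldl_cons, List.count_cons]
    rw [ih _ (by rw [length_inc_fold]; exact hlen)]
    rw [getD_inc_fold _ _ _ (by omega), count_pvIdx vocab w p hp]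
    by_cases h : vocab[p] = w
    · simp [h]; ring
    · simp [h, Ne.symm h]

-- And it preserves the length.
lemma length_word_fold (vocab : List String) (ws : List String) (freq : List Int) :
    (ws.foldl (fun freq w =>
        ((pvIdx vocab).getD w []).foldl (fun freq pos => freq.set pos (freq.getD pos 0 + 1)) freq)
      freq).length = freq.length := by
  induction ws generalizing freq with
  | nil => rfl
  | cons w ws ih => rw [List.foldl_cons, ih, length_inc_fold]

theorem vocab_freq_get_spec : Claim_equal_vocab_freq_get := by
  intro vocab_list msg_array _
  unfold Spec_vocab_freq_get vocab_freq_get vocab_freq_get_alt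
  -- A's output is the per-vocab-word counts of the flattened word list.
  simp only [PySem.List.foldl_append_eq_flatten, List.nil_append,
    PySem.List.foldl_append_singleton_eq_map]
  -- B's nested message loop is the word loop over the flattened word list.
  rw [show (List.foldl (fun d pw => d.insert pw.1 (d.getD pw.1 [] ++ [pw.2]))
        PySem.Dict.empty vocab_list.zipIdx) = pvIdx vocab_list from rfl,
    ← List.foldl_flatten]
  have hlen : (msg_array.flatten.foldl (fun freq w =>
        ((pvIdx vocab_list).getD w []).foldl (fun freq pos => freq.set pos (freq.getD pos 0 + 1)) freq)
      (List.replicate vocab_list.length (0 : Int))).length = vocab_list.length := by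
    rw [length_word_fold, List.length_replicate]
  have hB : ∀ p, p < vocab_list.length →
      (msg_array.flatten.foldl (fun freq w =>
          ((pvIdx vocab_list).getD w []).foldl (fun freq pos => freq.set pos (freq.getD pos 0 + 1)) freq)
        (List.replicate vocab_list.length (0 : Int))).getD p 0
        = (List.replicate vocab_list.length (0 : Int)).getD p 0
            + (msg_array.flatten.count vocab_list[p]! : Int) := by
    intro p hp
    have := getD_word_fold vocab_list msg_array.flatten
      (List.replicate vocab_list.length (0 : Int)) (by simp) p hp
    simpa [List.getElem!_eq_getElem?_getD, List.getElem?_eq_getElem, hp] using this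
  simp only [List.getD_eq_getElem?_getD] at hlen hB ⊢
  apply List.ext_getElem
  · simp [hlen]
  · intro p h1 h2
    have hp : p < vocab_list.length := by simpa using h1
    have h := hB p hp
    rw [List.getElem?_eq_getElem h2,
      List.getElem?_eq_getElem (by simpa using hp)] at h
    simp only [Option.getD_some, List.getElem_replicate, zero_add] at h
    rw [List.getElem_map, h]
    simp [PySem.List.count_eq, hp]
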